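-- pv_equiv track=rewrite | github.com/SST-Bappu/cracking_the_coding_interview | random/bit-manipulation/find-set-bit.py | find_set_bit
-- ===== SOURCE A (Python) =====
-- def find_set_bit(num):
--     cnt = 0
--
--     while num:
--         cnt+=1
--         if num & 1:
--             break
--         num = num>>1
--
--     return cnt if num==1 else -1
-- ===== SOURCE B (Python) =====
-- def find_set_bit(num):
--     if num > 0 and num & (num - 1) == 0:
--         return num.bit_length()
--     return -1
-- ===== Notes on version B (the rewrite author's own statement) =====
-- stated objective: idiomatic
-- what changed: Replaced the bit-stripping while loop by a closed-form power-of-two test (clearing the lowest set bit with num & (num-1), plus a positivity guard) returning num.bit_length().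
import Mathlib
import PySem

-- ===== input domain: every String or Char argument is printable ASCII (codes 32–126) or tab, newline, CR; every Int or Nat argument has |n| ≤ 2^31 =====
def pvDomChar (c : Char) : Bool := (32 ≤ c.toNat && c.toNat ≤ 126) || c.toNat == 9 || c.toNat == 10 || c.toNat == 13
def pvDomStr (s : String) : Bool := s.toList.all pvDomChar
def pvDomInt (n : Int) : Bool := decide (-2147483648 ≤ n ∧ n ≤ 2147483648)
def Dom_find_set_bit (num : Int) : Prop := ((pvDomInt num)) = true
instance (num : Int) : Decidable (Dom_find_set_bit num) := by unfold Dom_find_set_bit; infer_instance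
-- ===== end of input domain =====

-- B replaces A's bit-stripping loop by the closed-form power-of-two test
-- `num > 0 and num & (num - 1) == 0` returning num.bit_length() (objective: idiomatic).

-- ===== PORT A =====
-- termination fact for the while loop: when num is even and nonzero, num >> 1 shrinks |num|
theorem pvShiftAbsLt (num : Int) (h0 : ¬ num = 0) (he : ¬ PySem.Int.band num 1 ≠ 0) :
    (num >>> (1 : Nat)).natAbs < num.natAbs := by
  rw [PySem.Int.band_one, not_not] at he
  have hdvd : (2 : Int) ∣ num := (PySem.Int.mod_eq_zero_iff_dvd num 2).mp he
  have h2 : num % 2 = 0 := Int.emod_eq_zero_of_dvd hdvd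
  have hs : num >>> (1 : Nat) = num / 2 := by
    simpa using Int.shiftRight_eq_div_pow num 1
  rw [hs]
  omega

-- the while loop of A: returns (final num, final cnt)
def findLoop (num : Int) (cnt : Int) : Int × Int :=
  if h0 : num = 0 then (num, cnt)
  else
    if h1 : PySem.Int.band num 1 ≠ 0 then (num, cnt + 1)
    else findLoop (num >>> (1 : Nat)) (cnt + 1)
termination_by num.natAbs
decreasing_by exact pvShiftAbsLt num h0 h1

def find_set_bit (num : Int) : Int :=
  match findLoop num 0 with
  | (num', cnt) => if num' = 1 then cnt else -1

-- ===== PORT B =====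
def find_set_bit_alt (num : Int) : Int :=
  if num > 0 ∧ PySem.Int.band num (num - 1) = 0 then (PySem.Int.bitLength num : Int)
  else -1

-- ===== PRECONDITION & SPEC =====
def Spec_find_set_bit (num : Int) (out : Int) : Prop := out = find_set_bit_alt num
instance (num : Int) (out : Int) : Decidable (Spec_find_set_bit num out) := by unfold Spec_find_set_bit; infer_instance

-- ===== CLAIM (what is proved, stated in full; the proofs are below) =====
def Claim_equal_find_set_bit : Prop := ∀ (num : Int), Dom_find_set_bit num → Spec_find_set_bit num (find_set_bit num)

-- ===== LEMMAS AND PROOFS =====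

-- bit identity: (2a) &&& (2b+1) = 2 (a &&& b)
theorem pvLandKey (a b : Nat) : (2 * a) &&& (2 * b + 1) = 2 * (a &&& b) := by
  apply Nat.eq_of_testBit_eq
  intro i
  cases i with
  | zero =>
      simp [Nat.testBit_zero, Nat.mul_comm]
  | succ i =>
      have h1 : 2 * a / 2 = a := by omega
      have h2 : (2 * b + 1) / 2 = b := by omega
      have h3 : 2 * (a &&& b) / 2 = a &&& b := by omega
      rw [Nat.testBit_land, Nat.testBit_succ, Nat.testBit_succ, Nat.testBit_succ,
        h1, h2, h3, Nat.testBit_land]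

-- odd n: n &&& (n-1) = n - 1
theorem pvLandOdd (n : Nat) (h : n % 2 = 1) : n &&& (n - 1) = n - 1 := by
  have hn : n = 2 * (n / 2) + 1 := by omega
  have hk := pvLandKey (n / 2) (n / 2)
  rw [Nat.land_comm] at hk
  calc n &&& (n - 1) = (2 * (n / 2) + 1) &&& (2 * (n / 2)) := by rw [← hn]; congr 1; omega
    _ = 2 * (n / 2 &&& n / 2) := hk
    _ = n - 1 := by rw [Nat.and_self]; omega

-- even n ≥ 2: n &&& (n-1) = 2 * ((n/2) &&& (n/2 - 1))
theorem pvLandEven (n : Nat) (h : n % 2 = 0) (h2 : 2 ≤ n) :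
    n &&& (n - 1) = 2 * ((n / 2) &&& (n / 2 - 1)) := by
  have hk := pvLandKey (n / 2) (n / 2 - 1)
  calc n &&& (n - 1) = (2 * (n / 2)) &&& (2 * (n / 2 - 1) + 1) := by congr 1 <;> omega
    _ = 2 * ((n / 2) &&& (n / 2 - 1)) := hk

-- the natCast shift fact
theorem pvShiftCast (n : Nat) : ((n : Int) >>> (1 : Nat)) = ((n / 2 : Nat) : Int) := by
  have hs : (n : Int) >>> (1 : Nat) = (n : Int) / 2 := by
    simpa using Int.shiftRight_eq_div_pow (n : Int) 1
  rw [hs]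
  omega

-- characterisation of A's loop on positive inputs
theorem pvLoopPos (n : Nat) (hn : 0 < n) (cnt : Int) :
    if n &&& (n - 1) = 0 then
      findLoop (n : Int) cnt = (1, cnt + (PySem.Int.bitLength (n : Int) : Int))
    else (findLoop (n : Int) cnt).1 ≠ 1 := by
  induction n using Nat.strong_induction_on generalizing cnt with
  | _ n ih =>
    have hne : (n : Int) ≠ 0 := by exact_mod_cast hn.ne'
    have hband : PySem.Int.band (n : Int) 1 = ((n &&& 1 : Nat) : Int) := by
      exact_mod_cast PySem.Int.band_natCast n 1
    rw [Nat.and_one_is_mod] at hband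
    rcases Nat.mod_two_eq_zero_or_one n with hpar | hpar
    · -- even: loop recurses on n/2
      have h2 : 2 ≤ n := by omega
      have hstep : findLoop (n : Int) cnt = findLoop ((n / 2 : Nat) : Int) (cnt + 1) := by
        rw [findLoop]
        simp [hband, hpar, pvShiftCast, hn.ne']
      have hlt : n / 2 < n := by omega
      have hpos : 0 < n / 2 := by omega
      have hIH := ih (n / 2) hlt hpos (cnt + 1)
      have heq : n &&& (n - 1) = 2 * ((n / 2) &&& (n / 2 - 1)) := pvLandEven n hpar h2
      by_cases hc : (n / 2) &&& (n / 2 - 1) = 0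
      · have hc' : n &&& (n - 1) = 0 := by omega
        rw [if_pos hc] at hIH
        rw [if_pos hc', hstep, hIH]
        rw [PySem.Int.bitLength_natCast (m := n) hn]
        simp only [Prod.mk.injEq]
        exact ⟨trivial, by push_cast; ring⟩
      · have hc' : ¬ n &&& (n - 1) = 0 := by omega
        rw [if_neg hc] at hIH
        rw [if_neg hc', hstep]
        exact hIH
    · -- odd: loop stops with num' = n
      have hstep : findLoop (n : Int) cnt = ((n : Int), cnt + 1) := by
        rw [findLoop]
        simp [hband, hpar, hn.ne']
      by_cases h1 : n = 1
      · subst h1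
        simp only [Nat.cast_one] at hstep ⊢
        have hb : (PySem.Int.bitLength (1 : Int) : Int) = 1 := by decide
        simp [hstep, hb]
      · have h3 : 3 ≤ n := by omega
        have hodd : n &&& (n - 1) = n - 1 := pvLandOdd n hpar
        have hc' : ¬ n &&& (n - 1) = 0 := by omega
        rw [if_neg hc', hstep]
        simp only [ne_eq]
        intro hcontr
        omega

-- A's loop keeps a negative argument negative
theorem pvLoopNeg (n : Nat) : ∀ (num : Int), num < 0 → num.natAbs = n → ∀ cnt,
    (findLoop num cnt).1 < 0 := by
  induction n using Nat.strong_induction_on with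
  | _ n ih =>
    intro num hneg habs cnt
    have hne : num ≠ 0 := by omega
    rw [findLoop]
    by_cases h1 : PySem.Int.band num 1 ≠ 0
    · simp [hne, h1]
      exact hneg
    · simp [hne, h1]
      have hlt := pvShiftAbsLt num hne h1
      have hs : num >>> (1 : Nat) = num / 2 := by
        simpa using Int.shiftRight_eq_div_pow num 1
      have h2 : num % 2 = 0 := by
        rw [PySem.Int.band_one, not_not] at h1
        exact Int.emod_eq_zero_of_dvd ((PySem.Int.mod_eq_zero_iff_dvd num 2).mp h1)
      have hneg' : num >>> (1 : Nat) < 0 := by rw [hs]; omega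
      exact ih ((num >>> (1 : Nat)).natAbs) (habs ▸ hlt) (num >>> (1 : Nat)) hneg' rfl (cnt + 1)

-- ===== VERDICT (by name: the statement is the Claim_ definition above) =====
theorem find_set_bit_spec : Claim_equal_find_set_bit := by
  intro num _
  unfold Spec_find_set_bit find_set_bit find_set_bit_alt
  rcases lt_trichotomy num 0 with hneg | hzero | hpos
  · -- negative: loop result is negative, B's guard fails
    have h := pvLoopNeg num.natAbs num hneg rfl 0
    rcases hh : findLoop num 0 with ⟨n', c'⟩
    rw [hh] at h
    have h' : n' < 0 := h
    change (if n' = 1 then c' else -1) = _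
    rw [if_neg (show ¬ n' = 1 by omega), if_neg (by rintro ⟨h'', -⟩; omega)]
  · subst hzero
    have h0 : findLoop 0 0 = (0, 0) := by rw [findLoop]; simp
    simp [h0]
  · -- positive: use the loop characterisation
    obtain ⟨n, rfl⟩ : ∃ n : Nat, num = (n : Int) := ⟨num.toNat, by omega⟩
    have hn : 0 < n := by exact_mod_cast hpos
    have hchar := pvLoopPos n hn 0
    have hbandc : PySem.Int.band (n : Int) ((n : Int) - 1) = ((n &&& (n - 1) : Nat) : Int) := by
      have hcast : ((n : Int) - 1) = ((n - 1 : Nat) : Int) := by omega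
      rw [hcast]
      exact_mod_cast PySem.Int.band_natCast n (n - 1)
    by_cases hc : n &&& (n - 1) = 0
    · rw [if_pos hc] at hchar
      simp only [hchar]
      simp [hbandc, hc, hn]
    · rw [if_neg hc] at hchar
      rcases hh : findLoop (n : Int) 0 with ⟨n', c'⟩
      rw [hh] at hchar
      have hchar' : n' ≠ 1 := hchar
      change (if n' = 1 then c' else -1) = _
      rw [if_neg hchar', if_neg]
      rintro ⟨-, hb⟩
      rw [hbandc] at hb
      exact hc (by exact_mod_cast hb)
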